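-- pv_equiv track=rewrite | github.com/chyeang/complex_assembly_paths | Complex_assembly_reconstruction/src/network_drawer.py | all_edges
-- ===== SOURCE A (Python) =====
-- def all_edges(node_ls):
--     edge_ls = []
--     for node in node_ls:
--         if len(node)>1:
--             for i in node_ls:
--                 for j in node_ls:
--                     combine_node = i + j
--                     if combine_node == node:
--                         edge_ls.append((i, node))
--                         edge_ls.append((j, node))
--     return edge_ls
-- ===== SOURCE B (Python) =====
-- def all_edges(node_ls):
--     cnt = {}
--     for s in node_ls:
--         cnt[s] = cnt.get(s, 0) + 1
--     edge_ls = []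
--     for node in node_ls:
--         if len(node) > 1:
--             for i in node_ls:
--                 if node.startswith(i):
--                     suffix = node[len(i):]
--                     edge_ls += [(i, node), (suffix, node)] * cnt.get(suffix, 0)
--     return edge_ls
-- ===== Notes on version B (the rewrite author's own statement) =====
-- stated objective: faster
-- what changed: A's innermost scan over node_ls (testing every pair i+j against node) is removed: B builds a count dictionary of node_ls once and, for each prefix candidate i of node, appends the edge pair repeated by the counted occurrences of the matching suffix.
import Mathlib
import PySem

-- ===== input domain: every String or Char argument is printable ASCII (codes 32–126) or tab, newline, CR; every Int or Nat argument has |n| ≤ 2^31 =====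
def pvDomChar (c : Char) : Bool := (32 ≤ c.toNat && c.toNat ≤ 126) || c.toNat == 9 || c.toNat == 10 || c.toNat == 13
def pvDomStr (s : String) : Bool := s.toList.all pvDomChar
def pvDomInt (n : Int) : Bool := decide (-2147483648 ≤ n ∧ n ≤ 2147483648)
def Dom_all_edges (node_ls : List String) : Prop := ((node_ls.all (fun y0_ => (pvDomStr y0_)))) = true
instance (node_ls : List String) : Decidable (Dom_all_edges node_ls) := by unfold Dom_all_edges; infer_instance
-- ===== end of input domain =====

-- B replaces A's innermost scan over node_ls by a counter built once: per candidate prefix i it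
-- looks up how many copies of the matching suffix exist, instead of testing every pair (i, j).

-- ===== PORT A =====
def all_edges (node_ls : List String) : List (String × String) :=
  node_ls.foldl (fun edge_ls node =>
    if 1 < PySem.Str.len node then
      node_ls.foldl (fun acc i =>
        node_ls.foldl (fun acc2 j =>
          let combine_node := i ++ j
          if combine_node = node then acc2 ++ [(i, node), (j, node)] else acc2) acc) edge_ls
    else edge_ls) []

-- ===== PORT B =====
def all_edges_alt (node_ls : List String) : List (String × String) :=
  let cnt : PySem.Dict String Int :=
    node_ls.foldl (fun d s => d.insert s (d.getD s 0 + 1)) PySem.Dict.empty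
  node_ls.foldl (fun edge_ls node =>
    if 1 < PySem.Str.len node then
      node_ls.foldl (fun acc i =>
        if PySem.Str.startswith node i then
          let suffix := PySem.Str.slice node (some (PySem.Str.len i)) none
          acc ++ PySem.List.pyRepeat [(i, node), (suffix, node)] (cnt.getD suffix 0)
        else acc) edge_ls
    else edge_ls) []

-- ===== PRECONDITION & SPEC =====
def Spec_all_edges (node_ls : List String) (out : List (String × String)) : Prop := out = all_edges_alt node_ls
instance (node_ls : List String) (out : List (String × String)) : Decidable (Spec_all_edges node_ls out) := by unfold Spec_all_edges; infer_instance

-- ===== CLAIM (what is proved, stated in full; the proofs are below) =====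
def Claim_equal_all_edges : Prop := ∀ (node_ls : List String), Dom_all_edges node_ls → Spec_all_edges node_ls (all_edges node_ls)

-- ===== LEMMAS AND PROOFS =====

-- the suffix B slices off node after prefix i
def sufOf (node i : String) : String := PySem.Str.slice node (some (PySem.Str.len i)) none

lemma sufOf_toList (node i : String) : (sufOf node i).toList = node.toList.drop i.toList.length := by
  simp [sufOf, PySem.Str.toList_slice, PySem.Str.len_eq, PySem.List.slice_from_natCast]

-- 'i + j == node' ↔ 'node.startswith(i) and j == node[len(i):]'
lemma concat_iff (i j node : String) :
    i ++ j = node ↔ (PySem.Str.startswith node i = true ∧ j = sufOf node i) := by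
  rw [PySem.Str.startswith_eq, PySem.Chars.startswith_iff]
  constructor
  · rintro rfl
    refine ⟨⟨j.toList, by simp⟩, ?_⟩
    apply String.toList_inj.mp
    rw [sufOf_toList, String.toList_append, List.drop_left]
  · rintro ⟨⟨t, ht⟩, rfl⟩
    apply String.toList_inj.mp
    rw [String.toList_append, sufOf_toList, ← ht, List.drop_left]

-- A's innermost loop over j, when i is a prefix of node: each hit appends the same block
lemma innerA_pref (node i : String) (hs : PySem.Str.startswith node i = true)
    (l : List String) (acc : List (String × String)) :
    l.foldl (fun acc2 j => if i ++ j = node then acc2 ++ [(i, node), (j, node)] else acc2) acc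
      = acc ++ (List.replicate (l.count (sufOf node i)) [(i, node), (sufOf node i, node)]).flatten := by
  induction l generalizing acc with
  | nil => simp
  | cons x t ih =>
    simp only [List.foldl_cons]
    by_cases h : i ++ x = node
    · have hx : x = sufOf node i := ((concat_iff i x node).mp h).2
      rw [if_pos h, ih, hx, List.count_cons_self, List.replicate_succ]
      simp
    · have hx : x ≠ sufOf node i := fun he => h ((concat_iff i x node).mpr ⟨hs, he⟩)
      rw [if_neg h, ih, List.count_cons_of_ne hx]

-- A's innermost loop over j, when i is not a prefix of node: nothing is appended
lemma innerA_nopref (node i : String) (hs : ¬ PySem.Str.startswith node i = true)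
    (l : List String) (acc : List (String × String)) :
    l.foldl (fun acc2 j => if i ++ j = node then acc2 ++ [(i, node), (j, node)] else acc2) acc = acc := by
  induction l generalizing acc with
  | nil => rfl
  | cons x t ih =>
    simp only [List.foldl_cons]
    rw [if_neg (fun h => hs ((concat_iff i x node).mp h).1), ih]

-- B's counter lookup is the number of j's A's inner loop hits
lemma counter_getD (node_ls : List String) (v : String) :
    (node_ls.foldl (fun d s => d.insert s (d.getD s 0 + 1)) PySem.Dict.empty).getD v 0
      = (node_ls.count v : Int) := by
  rw [PySem.Dict.getD_foldl_insert_add_one]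
  show (0:Int) + _ = _
  omega

-- per (node, i) step: A's inner scan equals B's counted append
lemma step_eq (node_ls : List String) (node i : String) (acc : List (String × String)) :
    node_ls.foldl (fun acc2 j =>
        let combine_node := i ++ j
        if combine_node = node then acc2 ++ [(i, node), (j, node)] else acc2) acc
      = if PySem.Str.startswith node i then
          acc ++ PySem.List.pyRepeat [(i, node), (sufOf node i, node)]
            ((node_ls.foldl (fun d s => d.insert s (d.getD s 0 + 1)) PySem.Dict.empty).getD (sufOf node i) 0)
        else acc := by
  rw [counter_getD]
  by_cases hs : PySem.Str.startswith node i = true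
  · rw [if_pos hs, innerA_pref node i hs]
    simp [PySem.List.pyRepeat]
  · rw [if_neg hs, innerA_nopref node i hs]

-- ===== VERDICT (by name: the statement is the Claim_ definition above) =====
theorem all_edges_spec : Claim_equal_all_edges := by
  intro node_ls _
  unfold Spec_all_edges all_edges all_edges_alt
  apply PySem.List.foldl_congr_mem
  intro e node _
  by_cases hn : 1 < PySem.Str.len node
  · rw [if_pos hn, if_pos hn]
    apply PySem.List.foldl_congr_mem
    intro acc i _
    exact step_eq node_ls node i acc
  · rw [if_neg hn, if_neg hn]
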